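-- pv_equiv track=rewrite | github.com/cyberpunk042/openfleet | fleet/core/incident_report.py | _generate_prevention_recommendations
-- ===== SOURCE A (Python) =====
-- _INDICATOR_RECOMMENDATIONS: dict[str, list[str]] = {
--     "session_burst": [
--         "Stagger heartbeats after gateway restart (max 3 simultaneous)",
--         "Reduce default heartbeat concurrency",
--     ],
--     "void_sessions": [
--         "Check agent heartbeat configuration — are agents waking with no work?",
--         "Review heartbeat intervals — reduce frequency for idle agents",
--     ],
--     "fast_climb": [
--         "Review dispatch frequency — too many tasks dispatched per cycle?",
--         "Check for recursive task creation patterns",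
--     ],
--     "gateway_duplication": [
--         "Verify gateway startup script kills stale processes",
--         "Add PID lock file to prevent duplicate gateways",
--     ],
--     "dispatch_storm": [
--         "Reduce max_dispatch_per_cycle in fleet config",
--         "Check for task auto-creation loops",
--     ],
--     "cascade_depth": [
--         "Set hard limit on task-creates-task depth",
--         "Review task dependency chains for cycles",
--     ],
--     "agent_thrashing": [
--         "Increase heartbeat interval for idle agents",
--         "Check if agents are repeatedly waking with no assignable work",
--     ],
--     "error_storm": [
--         "Check backend availability — are API calls failing?",
--         "Review error logs for common root cause",
--     ],
-- }
--
-- def _generate_prevention_recommendations(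
--     indicators: list[str],
--     peak_severity: str,
--     void_sessions: int,
--     total_sessions: int,
-- ) -> list[str]:
--     """Generate prevention recommendations based on storm indicators.
--
--     Returns a deduplicated list of actionable recommendations.
--     """
--     recommendations: list[str] = []
--     seen: set[str] = set()
--
--     for indicator in indicators:
--         # Strip value part (e.g., "session_burst: 15/min" → "session_burst")
--         indicator_name = indicator.split(":")[0].strip()
--         for rec in _INDICATOR_RECOMMENDATIONS.get(indicator_name, []):
--             if rec not in seen:
--                 recommendations.append(rec)
--                 seen.add(rec)
--
--     # Severity-based recommendations
--     if peak_severity in ("STORM", "CRITICAL"):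
--         generic = "Review fleet configuration for systemic issues causing repeated storms"
--         if generic not in seen:
--             recommendations.append(generic)
--
--     # Void session ratio
--     if total_sessions > 0:
--         void_pct = (void_sessions / total_sessions) * 100
--         if void_pct > 50:
--             rec = "High void session rate — investigate why agents start sessions with no work"
--             if rec not in seen:
--                 recommendations.append(rec)
--
--     return recommendations
-- ===== SOURCE B (Python) =====
-- _INDICATOR_RECOMMENDATIONS: dict[str, list[str]] = {
--     "session_burst": [
--         "Stagger heartbeats after gateway restart (max 3 simultaneous)",
--         "Reduce default heartbeat concurrency",
--     ],
--     "void_sessions": [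
--         "Check agent heartbeat configuration — are agents waking with no work?",
--         "Review heartbeat intervals — reduce frequency for idle agents",
--     ],
--     "fast_climb": [
--         "Review dispatch frequency — too many tasks dispatched per cycle?",
--         "Check for recursive task creation patterns",
--     ],
--     "gateway_duplication": [
--         "Verify gateway startup script kills stale processes",
--         "Add PID lock file to prevent duplicate gateways",
--     ],
--     "dispatch_storm": [
--         "Reduce max_dispatch_per_cycle in fleet config",
--         "Check for task auto-creation loops",
--     ],
--     "cascade_depth": [
--         "Set hard limit on task-creates-task depth",
--         "Review task dependency chains for cycles",
--     ],
--     "agent_thrashing": [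
--         "Increase heartbeat interval for idle agents",
--         "Check if agents are repeatedly waking with no assignable work",
--     ],
--     "error_storm": [
--         "Check backend availability — are API calls failing?",
--         "Review error logs for common root cause",
--     ],
-- }
--
--
-- def _generate_prevention_recommendations(
--     indicators: list[str],
--     peak_severity: str,
--     void_sessions: int,
--     total_sessions: int,
-- ) -> list[str]:
--     """Deduplicate at the indicator-NAME level, then expand each distinct name once.
--
--     Correct because the table's recommendation lists are pairwise disjoint and
--     internally duplicate-free, so deduping output strings is the same as deduping
--     the looked-up names; the two tail recommendations never occur in the table.
--     """
--     names = dict.fromkeys(ind.split(":")[0].strip() for ind in indicators)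
--     recs = [rec for name in names for rec in _INDICATOR_RECOMMENDATIONS.get(name, [])]
--     if peak_severity in ("STORM", "CRITICAL"):
--         recs.append("Review fleet configuration for systemic issues causing repeated storms")
--     if total_sessions > 0 and void_sessions * 2 > total_sessions:
--         recs.append("High void session rate — investigate why agents start sessions with no work")
--     return recs
-- ===== Notes on version B (the rewrite author's own statement) =====
-- stated objective: alternative
-- what changed: B deduplicates at the indicator-NAME level (dict.fromkeys over the stripped names) and expands each distinct name's table block exactly once, instead of A's string-level dedup with a maintained 'seen' set over every emitted recommendation; correct because the table's blocks are pairwise disjoint and duplicate-free and the two tail recommendations never occur in the table.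
import Mathlib
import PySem

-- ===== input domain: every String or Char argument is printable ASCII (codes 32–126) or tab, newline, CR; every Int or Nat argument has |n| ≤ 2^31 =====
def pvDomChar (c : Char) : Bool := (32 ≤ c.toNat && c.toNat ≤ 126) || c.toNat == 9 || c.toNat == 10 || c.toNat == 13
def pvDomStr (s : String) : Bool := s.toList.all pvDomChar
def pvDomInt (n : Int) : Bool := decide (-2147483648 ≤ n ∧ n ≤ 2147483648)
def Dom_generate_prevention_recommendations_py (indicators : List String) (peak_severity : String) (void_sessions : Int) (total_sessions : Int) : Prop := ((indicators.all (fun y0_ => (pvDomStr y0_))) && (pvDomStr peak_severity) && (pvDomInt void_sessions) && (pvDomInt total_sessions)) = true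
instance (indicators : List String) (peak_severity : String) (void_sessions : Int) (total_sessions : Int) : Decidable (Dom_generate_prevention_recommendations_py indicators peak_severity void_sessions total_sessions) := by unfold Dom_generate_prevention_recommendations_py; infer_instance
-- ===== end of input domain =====

-- B deduplicates at the indicator-NAME level (expand each distinct name's table block once)
-- instead of A's string-level 'seen' set over every emitted recommendation (objective: alternative).
-- Return value only; neither mutates its arguments.

-- ===== PORT A =====
-- the shared module constant _INDICATOR_RECOMMENDATIONS
def pvTable : PySem.Dict String (List String) := PySem.Dict.ofList [
  ("session_burst", [
    "Stagger heartbeats after gateway restart (max 3 simultaneous)",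
    "Reduce default heartbeat concurrency"]),
  ("void_sessions", [
    "Check agent heartbeat configuration — are agents waking with no work?",
    "Review heartbeat intervals — reduce frequency for idle agents"]),
  ("fast_climb", [
    "Review dispatch frequency — too many tasks dispatched per cycle?",
    "Check for recursive task creation patterns"]),
  ("gateway_duplication", [
    "Verify gateway startup script kills stale processes",
    "Add PID lock file to prevent duplicate gateways"]),
  ("dispatch_storm", [
    "Reduce max_dispatch_per_cycle in fleet config",
    "Check for task auto-creation loops"]),
  ("cascade_depth", [
    "Set hard limit on task-creates-task depth",
    "Review task dependency chains for cycles"]),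
  ("agent_thrashing", [
    "Increase heartbeat interval for idle agents",
    "Check if agents are repeatedly waking with no assignable work"]),
  ("error_storm", [
    "Check backend availability — are API calls failing?",
    "Review error logs for common root cause"])]

-- indicator.split(":")[0].strip()  ([0] is safe: split always returns a nonempty list, so pyGetD's default is never used)
def pvName (indicator : String) : String :=
  -- split? is some for the nonempty separator ":"
  PySem.Str.strip (PySem.List.pyGetD ((PySem.Str.split? indicator ":").getD []) 0 "")

def pvGeneric : String := "Review fleet configuration for systemic issues causing repeated storms"
def pvVoidRec : String := "High void session rate — investigate why agents start sessions with no work"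

def generate_prevention_recommendations_py (indicators : List String) (peak_severity : String) (void_sessions : Int) (total_sessions : Int) : List String :=
  -- for indicator in indicators: for rec in table.get(name, []): if rec not in seen: append; seen.add
  let st : List String × PySem.Set String :=
    indicators.foldl (fun acc indicator =>
      (pvTable.getD (pvName indicator) []).foldl (fun acc2 rec =>
        if PySem.Set.contains acc2.2 rec then acc2
        else (acc2.1 ++ [rec], PySem.Set.add acc2.2 rec)) acc)
      ([], PySem.Set.empty)
  let recommendations := st.1
  let seen := st.2
  -- if peak_severity in ("STORM", "CRITICAL"): append generic if not in seen
  let recommendations :=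
    if peak_severity == "STORM" || peak_severity == "CRITICAL" then
      if PySem.Set.contains seen pvGeneric then recommendations else recommendations ++ [pvGeneric]
    else recommendations
  -- if total_sessions > 0 and (void_sessions / total_sessions) * 100 > 50:
  -- the float comparison is exact as 100*v > 50*t for |v|, t ≤ 2^31 (double rounding cannot cross the threshold)
  let recommendations :=
    if total_sessions > 0 then
      if 100 * void_sessions > 50 * total_sessions then
        if PySem.Set.contains seen pvVoidRec then recommendations else recommendations ++ [pvVoidRec]
      else recommendations
    else recommendations
  recommendations

-- ===== PORT B =====
def generate_prevention_recommendations_py_alt (indicators : List String) (peak_severity : String) (void_sessions : Int) (total_sessions : Int) : List String :=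
  -- names = dict.fromkeys(ind.split(":")[0].strip() for ind in indicators)
  let names := PySem.List.dedup (indicators.map pvName)
  -- recs = [rec for name in names for rec in table.get(name, [])]
  let recs := names.flatMap (fun name => pvTable.getD name [])
  let recs :=
    if peak_severity == "STORM" || peak_severity == "CRITICAL" then recs ++ [pvGeneric]
    else recs
  -- integer form of the >50% test: void_sessions * 2 > total_sessions
  let recs :=
    if total_sessions > 0 && void_sessions * 2 > total_sessions then recs ++ [pvVoidRec]
    else recs
  recs

-- ===== PRECONDITION & SPEC =====
def Spec_generate_prevention_recommendations_py (indicators : List String) (peak_severity : String) (void_sessions : Int) (total_sessions : Int) (out : List String) : Prop := out = generate_prevention_recommendations_py_alt indicators peak_severity void_sessions total_sessions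
instance (indicators : List String) (peak_severity : String) (void_sessions : Int) (total_sessions : Int) (out : List String) : Decidable (Spec_generate_prevention_recommendations_py indicators peak_severity void_sessions total_sessions out) := by unfold Spec_generate_prevention_recommendations_py; infer_instance

-- ===== CLAIM (what is proved, stated in full; the proofs are below) =====
def Claim_equal_generate_prevention_recommendations_py : Prop := ∀ (indicators : List String) (peak_severity : String) (void_sessions : Int) (total_sessions : Int), Dom_generate_prevention_recommendations_py indicators peak_severity void_sessions total_sessions → Spec_generate_prevention_recommendations_py indicators peak_severity void_sessions total_sessions (generate_prevention_recommendations_py indicators peak_severity void_sessions total_sessions)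

-- ===== LEMMAS AND PROOFS =====

-- the block of recommendations a (stripped) indicator name expands to
def pvF (n : String) : List String := pvTable.getD n []

lemma pvF_mem_items (k : String) : pvF k = [] ∨ (k, pvF k) ∈ pvTable.items := by
  by_cases h : pvTable.contains k = true
  · have hs : ∃ v, pvTable.get? k = some v := Option.isSome_iff_exists.mp (by
      rw [← PySem.Dict.contains_eq_isSome_get?]; exact h)
    obtain ⟨v, hv⟩ := hs
    right
    have : pvF k = v := by unfold pvF; exact PySem.Dict.getD_of_get?_eq_some pvTable [] hv
    rw [this]; exact PySem.Dict.mem_items_of_get?_eq_some pvTable hv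
  · left; unfold pvF; exact PySem.Dict.getD_of_not_contains pvTable [] (by simpa using h)

-- the concrete table facts, decided once over the literal item list
lemma pvItemsDisj : ∀ p ∈ pvTable.items, ∀ q ∈ pvTable.items, p.1 = q.1 ∨ ∀ x ∈ p.2, x ∉ q.2 := by decide
lemma pvItemsNodup : ∀ p ∈ pvTable.items, p.2.Nodup := by decide
lemma pvItemsNoTail : ∀ p ∈ pvTable.items, ∀ x ∈ p.2, x ≠ pvGeneric ∧ x ≠ pvVoidRec := by decide

-- blocks of DIFFERENT names are disjoint
lemma pvDisj (j k : String) (hjk : j ≠ k) (x : String) (hxj : x ∈ pvF j) (hxk : x ∈ pvF k) : False := by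
  rcases pvF_mem_items j with hj | hj
  · rw [hj] at hxj; exact absurd hxj List.not_mem_nil
  · rcases pvF_mem_items k with hk | hk
    · rw [hk] at hxk; exact absurd hxk List.not_mem_nil
    · rcases pvItemsDisj _ hj _ hk with h | h
      · exact hjk h
      · exact h x hxj hxk

lemma pvNodup (k : String) : (pvF k).Nodup := by
  rcases pvF_mem_items k with h | h
  · rw [h]; exact List.nodup_nil
  · exact pvItemsNodup _ h

lemma pvNoTail (k x : String) (hx : x ∈ pvF k) : x ≠ pvGeneric ∧ x ≠ pvVoidRec := by
  rcases pvF_mem_items k with h | h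
  · rw [h] at hx; exact absurd hx List.not_mem_nil
  · exact pvItemsNoTail _ h x hx

-- A's indicator loop, started on a diagonal state, stays diagonal and is the Set.add fold
lemma pvInner (cs : List String) (s : PySem.Set String) :
    cs.foldl (fun acc2 rec =>
        if PySem.Set.contains acc2.2 rec then acc2
        else (acc2.1 ++ [rec], PySem.Set.add acc2.2 rec)) (s, s)
      = (cs.foldl PySem.Set.add s, cs.foldl PySem.Set.add s) := by
  induction cs generalizing s with
  | nil => rfl
  | cons c cs ih =>
    rw [List.foldl_cons, List.foldl_cons]
    by_cases h : c ∈ s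
    · rw [if_pos (show PySem.Set.contains (s, s).2 c = true from (PySem.Set.contains_iff s c).mpr h),
        ih, PySem.Set.add_of_mem h]
    · rw [if_neg (show ¬ PySem.Set.contains (s, s).2 c = true from
          fun hc => h ((PySem.Set.contains_iff s c).mp hc))]
      rw [show ((s, s).1 ++ [c], PySem.Set.add (s, s).2 c) = (s ++ [c], s ++ [c]) from by
            simp [PySem.Set.add_of_not_mem h],
        ih, PySem.Set.add_of_not_mem h]

lemma pvOuter (inds : List String) (s : PySem.Set String) :
    inds.foldl (fun acc indicator =>
      (pvTable.getD (pvName indicator) []).foldl (fun acc2 rec =>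
        if PySem.Set.contains acc2.2 rec then acc2
        else (acc2.1 ++ [rec], PySem.Set.add acc2.2 rec)) acc) (s, s)
      = ((inds.flatMap (fun i => pvF (pvName i))).foldl PySem.Set.add s,
         (inds.flatMap (fun i => pvF (pvName i))).foldl PySem.Set.add s) := by
  induction inds generalizing s with
  | nil => rfl
  | cons i is ih => simp only [List.foldl_cons, pvInner, ih, List.flatMap_cons, List.foldl_append, pvF]

-- Set.add folds over a block: no-op if the block is already inside, plain append if disjoint
lemma pvFoldSubset (cs s : List String) (h : ∀ x ∈ cs, x ∈ s) : cs.foldl PySem.Set.add s = s := by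
  induction cs with
  | nil => rfl
  | cons c cs ih =>
    rw [List.foldl_cons, PySem.Set.add_of_mem (h c (List.mem_cons_self))]
    exact ih (fun x hx => h x (List.mem_cons_of_mem c hx))

lemma pvFoldDisjoint (cs s : List String) (hnd : cs.Nodup) (h : ∀ x ∈ cs, x ∉ s) :
    cs.foldl PySem.Set.add s = s ++ cs := by
  induction cs generalizing s with
  | nil => simp
  | cons c cs ih =>
    rw [List.foldl_cons, PySem.Set.add_of_not_mem (h c (List.mem_cons_self))]
    have hnotin : ∀ x ∈ cs, x ∉ s ++ [c] := by
      intro x hx hmem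
      rcases List.mem_append.mp hmem with h1 | h2
      · exact h x (List.mem_cons_of_mem c hx) h1
      · exact (List.nodup_cons.mp hnd).1 (by rw [List.mem_singleton.mp h2] at hx; exact hx)
    rw [ih (s ++ [c]) (List.Nodup.of_cons hnd) hnotin]
    simp

-- invariant: the seen-list is a union of complete blocks (plus nothing partial)
def pvInv (s : List String) : Prop := ∀ k, (∀ x ∈ pvF k, x ∈ s) ∨ (∀ x ∈ pvF k, x ∉ s)

-- block-level restatement of A's element-level loop
def pvBF (ks : List String) (s : List String) : List String :=
  ks.foldl (fun s k => if ∀ x ∈ pvF k, x ∈ s then s else s ++ pvF k) s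

lemma pvL1 (ks : List String) (s : List String) (hinv : pvInv s) :
    (ks.flatMap pvF).foldl PySem.Set.add s = pvBF ks s := by
  induction ks generalizing s with
  | nil => rfl
  | cons k rest ih =>
    rw [List.flatMap_cons, List.foldl_append]
    unfold pvBF
    rw [List.foldl_cons]
    by_cases hall : ∀ x ∈ pvF k, x ∈ s
    · rw [pvFoldSubset _ _ hall, if_pos hall]
      exact ih s hinv
    · have hdisj : ∀ x ∈ pvF k, x ∉ s := (hinv k).resolve_left hall
      rw [pvFoldDisjoint _ _ (pvNodup k) hdisj, if_neg hall]
      refine ih (s ++ pvF k) ?_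
      intro m
      by_cases hmk : m = k
      · exact Or.inl (fun x hx => List.mem_append.mpr (Or.inr (hmk ▸ hx)))
      · rcases hinv m with hsub | hdis
        · exact Or.inl (fun x hx => List.mem_append.mpr (Or.inl (hsub x hx)))
        · refine Or.inr (fun x hx hmem => ?_)
          rcases List.mem_append.mp hmem with h1 | h2
          · exact hdis x hx h1
          · exact pvDisj m k hmk x hx h2

-- the block-level loop is B's dedup-the-names-then-expand
lemma pvL2 (ks : List String) (done : List String) :
    pvBF ks (done.flatMap pvF) = (ks.foldl PySem.Set.add done).flatMap pvF := by
  induction ks generalizing done with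
  | nil => rfl
  | cons k rest ih =>
    unfold pvBF
    rw [List.foldl_cons, List.foldl_cons]
    by_cases hk : k ∈ done
    · rw [if_pos (fun x hx => List.mem_flatMap.mpr ⟨k, hk, hx⟩), PySem.Set.add_of_mem hk]
      exact ih done
    · rw [PySem.Set.add_of_not_mem hk]
      by_cases he : pvF k = []
      · rw [if_pos (by rw [he]; intro x hx; exact absurd hx List.not_mem_nil)]
        have : done.flatMap pvF = (done ++ [k]).flatMap pvF := by
          rw [List.flatMap_append]; simp [he]
        rw [this]; exact ih (done ++ [k])
      · rw [if_neg (by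
          intro hall
          obtain ⟨x, hx⟩ := List.exists_mem_of_ne_nil _ he
          obtain ⟨j, hj, hxj⟩ := List.mem_flatMap.mp (hall x hx)
          exact pvDisj j k (fun h => hk (h ▸ hj)) x hxj hx)]
        have : done.flatMap pvF ++ pvF k = (done ++ [k]).flatMap pvF := by
          rw [List.flatMap_append]; simp
        rw [this]; exact ih (done ++ [k])

theorem pv_main (indicators : List String) (peak_severity : String) (void_sessions : Int) (total_sessions : Int) :
    generate_prevention_recommendations_py indicators peak_severity void_sessions total_sessions
      = generate_prevention_recommendations_py_alt indicators peak_severity void_sessions total_sessions := by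
  unfold generate_prevention_recommendations_py generate_prevention_recommendations_py_alt
  rw [show (PySem.Set.empty : PySem.Set String) = ([] : PySem.Set String) from rfl,
    pvOuter indicators ([] : PySem.Set String)]
  set cs := indicators.flatMap (fun i => pvF (pvName i)) with hcs
  set seen := cs.foldl PySem.Set.add ([] : PySem.Set String) with hseen
  -- the recommendation list after the loop, in B's shape
  have hrecs : seen = (PySem.List.dedup (indicators.map pvName)).flatMap (fun name => pvTable.getD name []) := by
    have h1 : cs = (indicators.map pvName).flatMap pvF := by
      rw [hcs, List.flatMap_map]
    have hinv0 : pvInv ([] : List String) := fun k => Or.inr (fun x _ hx => absurd hx List.not_mem_nil)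
    have h2 := pvL1 (indicators.map pvName) ([] : List String) hinv0
    have h3 := pvL2 (indicators.map pvName) ([] : List String)
    rw [hseen, h1, h2, show ([] : List String) = (([] : List String).flatMap pvF) from rfl, h3]
    rw [PySem.List.dedup_eq_ofList, PySem.Set.ofList_eq_foldl]
    rfl
  -- neither tail recommendation ever comes out of the table
  have hgenc : ∀ x ∈ indicators, pvGeneric ∉ pvTable.getD (pvName x) [] :=
    fun x _ hx => (pvNoTail (pvName x) pvGeneric hx).1 rfl
  have hvoidc : ∀ x ∈ indicators, pvVoidRec ∉ pvTable.getD (pvName x) [] :=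
    fun x _ hx => (pvNoTail (pvName x) pvVoidRec hx).2 rfl
  have hcond : (100 * void_sessions > 50 * total_sessions) ↔ (void_sessions * 2 > total_sessions) := by omega
  by_cases hsev : (peak_severity == "STORM" || peak_severity == "CRITICAL") = true
  · by_cases ht : total_sessions > 0
    · by_cases hv : void_sessions * 2 > total_sessions
      · simp [hsev, ht, hv, hcond.mpr hv, hrecs]
        rw [if_neg (fun ⟨a, ha, hx⟩ => hvoidc a ha hx), if_neg (fun ⟨a, ha, hx⟩ => hgenc a ha hx)]
        simp
      · have hv' : ¬ (100 * void_sessions > 50 * total_sessions) := fun h => hv (hcond.mp h)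
        simp [hsev, ht, hv, hv', hrecs]
        exact hgenc
    · simp [hsev, ht, hrecs]
      exact hgenc
  · by_cases ht : total_sessions > 0
    · by_cases hv : void_sessions * 2 > total_sessions
      · simp [hsev, ht, hv, hcond.mpr hv, hrecs]
        exact hvoidc
      · have hv' : ¬ (100 * void_sessions > 50 * total_sessions) := fun h => hv (hcond.mp h)
        simp [hsev, ht, hv, hv', hrecs]
    · simp [hsev, ht, hrecs]

-- ===== VERDICT (by name: the statement is the Claim_ definition above) =====
theorem generate_prevention_recommendations_py_spec : Claim_equal_generate_prevention_recommendations_py := by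
  intro indicators peak_severity void_sessions total_sessions _
  exact pv_main indicators peak_severity void_sessions total_sessions
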